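-- pv_equiv track=rewrite | github.com/AlekseyBurak/tms_aqa_python_17 | annayadevich/Lesson 6/HW6_1.py | characters_count
-- ===== SOURCE A (Python) =====
-- def characters_count(input_string):
--     char_count = {}
--     for char in input_string:
--         if char in char_count:
--             char_count[char] += 1
--         else:
--             char_count[char] = 1
--     result_string = ""
--     for char, count in char_count.items():
--         if count == 1:
--             result_string += char
--         else:
--             result_string += char + str(count)
--     return result_string
-- ===== SOURCE B (Python) =====
-- def characters_count(input_string):
--     if not input_string:
--         return ""
--     c = input_string[0]
--     n = input_string.count(c)
--     rest = "".join(ch for ch in input_string if ch != c)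
--     return (c if n == 1 else c + str(n)) + characters_count(rest)
-- ===== Notes on version B (the rewrite author's own statement) =====
-- stated objective: alternative
-- what changed: B is a recursive partition: no frequency table at all - it emits the chunk for the first character (counted with str.count) and recurses on the string with every occurrence of that character filtered out, whereas A builds a dict of counts in one pass and then walks its items.
import Mathlib
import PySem

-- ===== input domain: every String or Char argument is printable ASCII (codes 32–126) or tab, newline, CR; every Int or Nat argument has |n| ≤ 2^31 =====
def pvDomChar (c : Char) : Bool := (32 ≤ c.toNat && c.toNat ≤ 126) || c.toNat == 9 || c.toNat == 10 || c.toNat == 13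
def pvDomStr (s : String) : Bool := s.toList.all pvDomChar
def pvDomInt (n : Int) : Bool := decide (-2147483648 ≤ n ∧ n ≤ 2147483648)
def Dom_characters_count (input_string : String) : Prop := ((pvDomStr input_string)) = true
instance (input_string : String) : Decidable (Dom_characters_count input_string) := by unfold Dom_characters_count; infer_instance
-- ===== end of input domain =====

-- B is a recursive partition with no frequency table: it emits the chunk for the first
-- character (counted with str.count) and recurses on the string with that character
-- filtered out (objective: alternative).

-- ===== PORT A =====
def characters_count (input_string : String) : String :=
  let char_count : PySem.Dict Char Int := input_string.toList.foldl
    (fun d c => if d.contains c then d.insert c (d.getD c 0 + 1) else d.insert c 1)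
    PySem.Dict.empty
  let result_string : List Char := char_count.items.foldl
    (fun acc p => if p.2 == 1 then acc ++ [p.1] else acc ++ (p.1 :: PySem.Int.toChars p.2)) []
  String.ofList result_string

-- ===== PORT B =====
def characters_count_go : List Char → List Char
  | [] => []
  | c :: t =>
    let n := PySem.Chars.count (c :: t) [c]
    let rest := (c :: t).filter (fun ch => ch != c)
    (if n == 1 then [c] else c :: PySem.Int.toChars (n : Int)) ++ characters_count_go rest
termination_by l => l.length
decreasing_by
  simp only [List.filter_cons, bne_self_eq_false]
  exact Nat.lt_succ_of_le (List.length_filter_le _ _)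

def characters_count_alt (input_string : String) : String :=
  String.ofList (characters_count_go input_string.toList)

-- ===== PRECONDITION & SPEC =====
def Spec_characters_count (input_string : String) (out : String) : Prop := out = characters_count_alt input_string
instance (input_string : String) (out : String) : Decidable (Spec_characters_count input_string out) := by unfold Spec_characters_count; infer_instance

-- ===== CLAIM (what is proved, stated in full; the proofs are below) =====
def Claim_equal_characters_count : Prop := ∀ (input_string : String), Dom_characters_count input_string → Spec_characters_count input_string (characters_count input_string)

-- ===== LEMMAS AND PROOFS =====

-- s.count(c) for a single character c is the element count (Chars.count is substring count;
-- proved over its fuelled worker, which steps one position at a time for a length-1 needle)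
theorem pv_count_go_singleton (c : Char) : ∀ (l : List Char) (fuel acc : Nat), l.length ≤ fuel →
    PySem.Chars.count.go [c] fuel l acc = acc + l.count c := by
  intro l
  induction l with
  | nil => intro fuel acc _; cases fuel <;> simp [PySem.Chars.count.go]
  | cons h t ih =>
    intro fuel acc hf
    cases fuel with
    | zero => simp at hf
    | succ f =>
      simp only [PySem.Chars.count.go]
      by_cases hc : c = h
      · subst hc
        simp [List.isPrefixOf, ih f (acc+1) (by simpa using hf)]
        omega
      · simp [List.isPrefixOf, hc, ih f acc (by simpa using hf), Ne.symm hc]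

theorem pv_count_singleton (l : List Char) (c : Char) : PySem.Chars.count l [c] = l.count c := by
  simp [PySem.Chars.count, pv_count_go_singleton c l l.length _ le_rfl]

-- set(xs) (ordered, first occurrences) commutes with filtering
theorem pv_ofList_filter (p : Char → Bool) : ∀ (xs : List Char),
    PySem.Set.ofList (xs.filter p) = (PySem.Set.ofList xs).filter p := by
  intro xs
  induction xs with
  | nil => rfl
  | cons x t ih =>
    rw [PySem.Set.ofList_cons]
    by_cases hp : p x = true
    · rw [List.filter_cons_of_pos hp, PySem.Set.ofList_cons, ih,
        List.filter_cons_of_pos hp]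
      show _ :: List.filter _ (List.filter _ _) = _ :: List.filter _ (List.filter _ _)
      rw [List.filter_comm]
    · have hp' : p x = false := by simpa using hp
      rw [List.filter_cons_of_neg (by simp [hp']), ih,
        List.filter_cons_of_neg (by simp [hp'])]
      show List.filter p _ = List.filter p (List.filter _ _)
      rw [List.filter_comm]
      refine (List.filter_eq_self.mpr ?_).symm
      intro y hy
      have hpy : p y = true := List.of_mem_filter hy
      have hyx : y ≠ x := fun h => by subst h; rw [hp'] at hpy; exact Bool.noConfusion hpy
      simpa using hyx
  -- (PySem.Set.discard s x is definitionally s.filter (· != x), used via `show` above)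

-- the ordered distinct elements of c :: t: c first, then those of t with c removed
theorem pv_ofList_cons_filter (c : Char) (t : List Char) :
    PySem.Set.ofList (c :: t) = c :: PySem.Set.ofList (t.filter (fun y => y != c)) := by
  rw [PySem.Set.ofList_cons, pv_ofList_filter]
  rfl

-- B's recursion computes the flatMap over the ordered distinct characters with counts in l
theorem pv_go_eq (l : List Char) :
    characters_count_go l = (PySem.Set.ofList l).flatMap
      (fun c => if l.count c == 1 then [c] else c :: PySem.Int.toChars ((l.count c : Nat) : Int)) := by
  induction hn : l.length using Nat.strong_induction_on generalizing l with
  | _ n ih =>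
    cases l with
    | nil => simp [characters_count_go]
    | cons c t =>
      rw [characters_count_go]
      simp only [pv_count_singleton]
      have hrest : (c :: t).filter (fun ch => ch != c) = t.filter (fun ch => ch != c) := by
        simp
      rw [hrest]
      have hlen : (t.filter (fun ch => ch != c)).length < n := by
        subst hn
        exact Nat.lt_succ_of_le (List.length_filter_le _ _)
      rw [ih _ hlen _ rfl, pv_ofList_cons_filter, List.flatMap_cons]
      congr 1
      apply List.flatMap_congr
      intro d hd
      have hdmem : d ∈ t.filter (fun ch => ch != c) :=
        (PySem.Set.mem_ofList _ _).mp hd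
      have hdne : d ≠ c := by
        have := List.of_mem_filter hdmem
        simpa using this
      have hcount : (t.filter (fun ch => ch != c)).count d = (c :: t).count d := by
        rw [List.count_cons_of_ne hdne.symm, List.count_filter]
        simp [hdne]
      rw [hcount]

-- A's counting loop builds exactly Counter(input_string)
theorem pv_loopA_eq_counter (l : List Char) :
    l.foldl (fun (d : PySem.Dict Char Int) c =>
        if d.contains c then d.insert c (d.getD c 0 + 1) else d.insert c 1) PySem.Dict.empty
      = PySem.Dict.counter l := by
  have hstep : (fun (d : PySem.Dict Char Int) c =>
      if d.contains c then d.insert c (d.getD c 0 + 1) else d.insert c 1)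
      = fun d c => d.insert c (d.getD c 0 + 1) := by
    funext d c
    by_cases h : d.contains c = true
    · simp [h]
    · have h' : d.contains c = false := by simpa using h
      have hg : d.getD c 0 = 0 := PySem.Dict.getD_of_not_contains d 0 h'
      simp [h', hg]
  rw [hstep, PySem.Dict.foldl_insert_getD_add_one_eq_counter]

-- ===== VERDICT (by name: the statement is the Claim_ definition above) =====
theorem characters_count_spec : Claim_equal_characters_count := by
  intro s _
  unfold Spec_characters_count characters_count characters_count_alt
  dsimp only
  rw [pv_loopA_eq_counter, pv_go_eq]
  have hA : (PySem.Dict.counter s.toList).items.foldl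
      (fun acc p => if p.2 == 1 then acc ++ [p.1] else acc ++ (p.1 :: PySem.Int.toChars p.2)) []
      = ((PySem.Dict.counter s.toList).items.flatMap
          (fun p => if p.2 == 1 then [p.1] else p.1 :: PySem.Int.toChars p.2)) := by
    have h : (fun (acc : List Char) (p : Char × Int) =>
        if p.2 == 1 then acc ++ [p.1] else acc ++ (p.1 :: PySem.Int.toChars p.2))
        = fun acc p => acc ++ (if p.2 == 1 then [p.1] else p.1 :: PySem.Int.toChars p.2) := by
      funext acc p; split <;> rfl
    rw [h, PySem.List.foldl_append_eq_flatMap]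
    simp
  rw [hA, PySem.Dict.items_counter, List.flatMap_map]
  apply congrArg
  apply List.flatMap_congr
  intro c _
  by_cases h1 : s.toList.count c = 1
  · simp [h1]
  · have : ((s.toList.count c : Int)) ≠ 1 := by exact_mod_cast h1
    simp [h1, this]
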